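-- pv_equiv track=rewrite | github.com/bvalot/panISa | ISFinder_search.py | get_irl_irr
-- ===== SOURCE A (Python) =====
-- def get_irl_irr(mergedPanISa, length):
--     seqs = {}
--     for v in mergedPanISa:
--         name = v.get("sample")
--         irl = v.get("irl")[:length]
--         irr = v.get("irr")[-length:]
--         while len(irr) < length:
--             irr = irr+"N"
--         while len(irl) < length:
--             irl = "N"+irl
--         chroPos = v.get("chrompos")
--         currentSeq = irl+irr
--         if chroPos not in seqs:
--             seqs[chroPos] = currentSeq
--         elif currentSeq.count("N") < seqs.get(chroPos).count("N"):
--             seqs[chroPos] = currentSeq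
--     return seqs
-- ===== SOURCE B (Python) =====
-- def get_irl_irr(mergedPanISa, length):
--     def padded(v):
--         irl = v.get("irl")[:length]
--         irr = v.get("irr")[-length:]
--         irr = irr + "N" * (length - len(irr))
--         irl = "N" * (length - len(irl)) + irl
--         return irl + irr
--     groups = {}
--     for v in mergedPanISa:
--         groups.setdefault(v.get("chrompos"), []).append(padded(v))
--     return {pos: min(cands, key=lambda s: s.count("N"))
--             for pos, cands in groups.items()}
-- ===== Notes on version B (the rewrite author's own statement) =====
-- stated objective: simpler
-- what changed: A maintains a running best-per-chrompos dict with an in-loop comparison and pads with character-at-a-time while loops; B first groups all padded sequences per chrompos (setdefault/append, padding by string multiplication), then reduces each group with min(key=N-count) in a dict comprehension, whose first-minimal tie rule matches A's strict '<' first-wins rule.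
-- outside the precondition, e.g. on get_irl_irr([{'irl': 'ACG', 'irr': 'TT'}], 2): A returns {None: 'ACTT'}, B returns {None: 'ACTT'}
import Mathlib
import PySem

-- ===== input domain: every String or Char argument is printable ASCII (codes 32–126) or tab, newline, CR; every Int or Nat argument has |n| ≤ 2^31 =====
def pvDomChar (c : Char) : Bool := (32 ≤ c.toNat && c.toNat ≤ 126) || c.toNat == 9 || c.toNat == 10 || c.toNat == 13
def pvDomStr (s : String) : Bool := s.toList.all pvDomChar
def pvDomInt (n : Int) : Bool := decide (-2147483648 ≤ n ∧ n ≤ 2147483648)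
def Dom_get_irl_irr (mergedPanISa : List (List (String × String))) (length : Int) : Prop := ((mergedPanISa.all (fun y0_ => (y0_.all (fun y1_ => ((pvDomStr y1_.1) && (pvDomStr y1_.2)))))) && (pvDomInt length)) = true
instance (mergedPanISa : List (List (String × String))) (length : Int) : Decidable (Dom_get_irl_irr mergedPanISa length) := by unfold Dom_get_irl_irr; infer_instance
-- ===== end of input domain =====

-- B replaces A's running best-per-position dict with a two-phase group-then-reduce
-- (collect all padded sequences per chrompos, then take min by N-count); objective: simpler.


-- ===== PORT A =====
-- while len(irr) < length: irr = irr + "N"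
def pyPadR (length : Int) (irr : List Char) : List Char :=
  if (irr.length : Int) < length then pyPadR length (irr ++ ['N']) else irr
termination_by (length - irr.length).toNat
decreasing_by simp; omega

-- while len(irl) < length: irl = "N" + irl
def pyPadL (length : Int) (irl : List Char) : List Char :=
  if (irl.length : Int) < length then pyPadL length ('N' :: irl) else irl
termination_by (length - irl.length).toNat
decreasing_by simp; omega

-- one iteration of A's loop body (records with missing "irl"/"irr"/"chrompos" are outside Pre_,
-- the getD default is never read there)
def stepA (length : Int) (seqs : PySem.Dict String String) (v : List (String × String)) :
    PySem.Dict String String :=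
  let d := PySem.Dict.mk v
  let irl := PySem.List.slice (d.getD "irl" "").toList none (some length)
  let irr := PySem.List.slice (d.getD "irr" "").toList (some (-length)) none
  let irr1 := pyPadR length irr
  let irl1 := pyPadL length irl
  let chroPos := d.getD "chrompos" ""
  let currentSeq := String.ofList (irl1 ++ irr1)
  if seqs.contains chroPos = false then
    seqs.insert chroPos currentSeq
  else if PySem.Chars.count currentSeq.toList ['N'] <
          PySem.Chars.count (seqs.getD chroPos "").toList ['N'] then
    seqs.insert chroPos currentSeq
  else
    seqs

def get_irl_irr (mergedPanISa : List (List (String × String))) (length : Int) : List (String × String) :=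
  (mergedPanISa.foldl (stepA length) PySem.Dict.empty).items

-- ===== PORT B =====
-- padded(v): both slices, then "N"-padding by string multiplication instead of while loops
def paddedB (length : Int) (v : List (String × String)) : String :=
  let d := PySem.Dict.mk v
  let irl := PySem.List.slice (d.getD "irl" "").toList none (some length)
  let irr := PySem.List.slice (d.getD "irr" "").toList (some (-length)) none
  let irr1 := irr ++ List.replicate (length - irr.length).toNat 'N'
  let irl1 := List.replicate (length - irl.length).toNat 'N' ++ irl
  String.ofList (irl1 ++ irr1)

-- groups.setdefault(v.get("chrompos"), []).append(padded(v))
def stepB (length : Int) (groups : PySem.Dict String (List String)) (v : List (String × String)) :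
    PySem.Dict String (List String) :=
  let k := (PySem.Dict.mk v).getD "chrompos" ""
  let g1 := groups.setdefault k []
  g1.insert k (g1.getD k [] ++ [paddedB length v])

def get_irl_irr_alt (mergedPanISa : List (List (String × String))) (length : Int) : List (String × String) :=
  let groups := mergedPanISa.foldl (stepB length) PySem.Dict.empty
  groups.items.map (fun p =>
    (p.1, match PySem.List.min? p.2 (fun s => PySem.Chars.count s.toList ['N']) with
          | some s => s
          | none => ""))   -- unreachable: every group is nonempty

-- ===== PRECONDITION & SPEC =====
-- Pre_ requires every record to carry the keys "irl", "irr" and "chrompos": without "irl"/"irr"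
-- Python A raises TypeError (slicing None), and without "chrompos" A returns a dict keyed by None,
-- which is not a value of the declared dict[str, str] type.
def Pre_get_irl_irr (mergedPanISa : List (List (String × String))) (length : Int) : Prop :=
  ∀ v ∈ mergedPanISa, "irl" ∈ v.map Prod.fst ∧ "irr" ∈ v.map Prod.fst ∧ "chrompos" ∈ v.map Prod.fst
instance (mergedPanISa : List (List (String × String))) (length : Int) : Decidable (Pre_get_irl_irr mergedPanISa length) := by unfold Pre_get_irl_irr; infer_instance

def pvWitness_get_irl_irr : (List (List (String × String))) × Int :=
  ([[("irl", "ACG"), ("irr", "TT"), ("chrompos", "p1")],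
    [("irl", "NN"), ("irr", "GATT"), ("chrompos", "p1")]], 3)

def Spec_get_irl_irr (mergedPanISa : List (List (String × String))) (length : Int) (out : List (String × String)) : Prop := out = get_irl_irr_alt mergedPanISa length
instance (mergedPanISa : List (List (String × String))) (length : Int) (out : List (String × String)) : Decidable (Spec_get_irl_irr mergedPanISa length out) := by unfold Spec_get_irl_irr; infer_instance

-- ===== CLAIM (what is proved, stated in full; the proofs are below) =====
def Claim_equal_get_irl_irr : Prop := ∀ (mergedPanISa : List (List (String × String))) (length : Int), Dom_get_irl_irr mergedPanISa length → Pre_get_irl_irr mergedPanISa length → Spec_get_irl_irr mergedPanISa length (get_irl_irr mergedPanISa length)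

-- ===== LEMMAS AND PROOFS =====

-- A's two while-padding loops compute B's replicate-padding
theorem pyPadR_eq (length : Int) (cs : List Char) :
    pyPadR length cs = cs ++ List.replicate (length - cs.length).toNat 'N' := by
  fun_induction pyPadR length cs with
  | case1 cs h ih =>
      rw [ih]
      have hn : (length - cs.length).toNat = (length - ((cs ++ ['N']).length : Int)).toNat + 1 := by
        simp; omega
      rw [hn, List.replicate_succ, List.append_assoc]
      rfl
  | case2 cs h =>
      have hn : (length - cs.length).toNat = 0 := by omega
      simp [hn]

theorem pyPadL_eq (length : Int) (cs : List Char) :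
    pyPadL length cs = List.replicate (length - cs.length).toNat 'N' ++ cs := by
  fun_induction pyPadL length cs with
  | case1 cs h ih =>
      rw [ih]
      have hn : (length - cs.length).toNat = (length - (('N' :: cs).length : Int)).toNat + 1 := by
        simp; omega
      rw [hn, List.replicate_succ']
      simp
  | case2 cs h =>
      have hn : (length - cs.length).toNat = 0 := by omega
      simp [hn]

def keyN (s : String) : Nat := PySem.Chars.count s.toList ['N']

def minSel (c : List String) : String :=
  match PySem.List.min? c keyN with
  | some s => s
  | none => ""

theorem min?_append_singleton {α κ : Type} [LT κ] [DecidableLT κ] (c : List α) (s : α) (key : α → κ) :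
    PySem.List.min? (c ++ [s]) key =
      match PySem.List.min? c key with
      | none => some s
      | some m => some (if key s < key m then s else m) := by
  cases hm : PySem.List.min? c key with
  | none =>
      have h0 : c = [] := (PySem.List.min?_eq_none_iff c key).mp hm
      subst h0; rfl
  | some m =>
      simp only [PySem.List.min?] at hm ⊢
      rw [List.foldl_append, hm]
      rw [apply_ite some, List.foldl_cons, List.foldl_nil]

-- the step invariant
def DInv (seqs : PySem.Dict String String) (groups : PySem.Dict String (List String)) : Prop :=
  seqs.items = groups.items.map (fun p => (p.1, minSel p.2)) ∧ groups.keys.Nodup ∧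
    ∀ p ∈ groups.items, p.2 ≠ []

theorem DInv_step (length : Int) (seqs : PySem.Dict String String)
    (groups : PySem.Dict String (List String)) (v : List (String × String)) (h : DInv seqs groups) :
    DInv (stepA length seqs v) (stepB length groups v) := by
  obtain ⟨hitems, hnd, hne⟩ := h
  have hkeys : seqs.keys = groups.keys := by
    simp only [PySem.Dict.keys, hitems, List.map_map]; rfl
  have hndS : seqs.keys.Nodup := by rw [hkeys]; exact hnd
  set k := (PySem.Dict.mk v).getD "chrompos" "" with hkdef
  set s := paddedB length v with hsdef
  have hcontains : seqs.contains k = groups.contains k := by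
    rw [PySem.Dict.contains_eq_decide_mem_keys, PySem.Dict.contains_eq_decide_mem_keys, hkeys]
  have hpad : String.ofList
      (pyPadL length (PySem.List.slice ((PySem.Dict.mk v).getD "irl" "").toList none (some length)) ++
       pyPadR length (PySem.List.slice ((PySem.Dict.mk v).getD "irr" "").toList (some (-length)) none)) = s := by
    rw [hsdef]; simp only [paddedB, pyPadR_eq, pyPadL_eq]
  by_cases hc : groups.contains k = true
  · -- the chrompos key was seen before
    obtain ⟨c, hgc⟩ : ∃ c, groups.get? k = some c := by
      rw [PySem.Dict.contains_eq_isSome_get?] at hc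
      exact Option.isSome_iff_exists.mp hc
    have hmemg : (k, c) ∈ groups.items := (PySem.Dict.get?_eq_some_iff_mem_items groups k c hnd).mp hgc
    have hcne : c ≠ [] := hne _ hmemg
    have hmem : (k, minSel c) ∈ seqs.items := by
      rw [hitems]; exact List.mem_map.mpr ⟨(k, c), hmemg, rfl⟩
    have hgetS : seqs.getD k "" = minSel c := PySem.Dict.getD_of_mem_items seqs hmem hndS ""
    obtain ⟨m, hm⟩ : ∃ m, PySem.List.min? c keyN = some m := by
      cases hmc : PySem.List.min? c keyN with
      | none => exact absurd ((PySem.List.min?_eq_none_iff c keyN).mp hmc) hcne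
      | some m => exact ⟨m, rfl⟩
    have hminc : minSel c = m := by rw [minSel, hm]
    have hSc : seqs.contains k = true := by rw [hcontains]; exact hc
    have huniq : ∀ p ∈ groups.items, p.1 = k → p.2 = c := by
      intro p hp hpk
      have h1 : groups.get? p.1 = some p.2 := PySem.Dict.get?_of_mem_items groups hp hnd
      rw [hpk, hgc] at h1
      exact (Option.some_inj.mp h1).symm
    have hB : stepB length groups v = groups.insert k (c ++ [s]) := by
      simp only [stepB, ← hkdef, ← hsdef, PySem.Dict.setdefault_of_contains groups [] hc,
        PySem.Dict.getD_eq_get?_getD, hgc, Option.getD_some]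
    have hA : stepA length seqs v =
        if keyN s < keyN (minSel c) then seqs.insert k s else seqs := by
      simp only [stepA, ← hkdef, hpad, hSc, hgetS, keyN]
      rfl
    rw [hA, hB]
    refine ⟨?_, ?_, ?_⟩
    · -- items
      rw [PySem.Dict.items_insert_of_contains groups (c ++ [s]) hc, List.map_map, hminc]
      by_cases hlt : keyN s < keyN m
      · rw [if_pos hlt, PySem.Dict.items_insert_of_contains seqs s hSc, hitems, List.map_map]
        refine List.map_congr_left ?_
        intro p hp
        by_cases hpk : p.1 = k
        · simp [Function.comp, hpk, minSel, min?_append_singleton, hm, hlt]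
        · simp [Function.comp, hpk, minSel]
      · rw [if_neg hlt, hitems]
        refine List.map_congr_left ?_
        intro p hp
        by_cases hpk : p.1 = k
        · have hpc := huniq p hp hpk
          simp [Function.comp, hpk, hpc, minSel, min?_append_singleton, hm, hlt]
        · simp [Function.comp, hpk]
    · -- keys stay Nodup
      exact PySem.Dict.nodup_keys_insert groups k (c ++ [s]) hnd
    · -- values stay nonempty
      intro p hp
      rcases (PySem.Dict.mem_items_insert groups k (c ++ [s]) p).mp hp with hpe | ⟨hpo, _⟩
      · rw [hpe]; simp
      · exact hne _ hpo
  · -- fresh chrompos key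
    have hc' : groups.contains k = false := by
      cases hgb : groups.contains k with
      | false => rfl
      | true => exact absurd hgb hc
    have hSc : seqs.contains k = false := by rw [hcontains]; exact hc'
    have hB : stepB length groups v = groups.insert k [s] := by
      simp only [stepB, ← hkdef, ← hsdef, PySem.Dict.setdefault_of_not_contains groups [] hc',
        PySem.Dict.getD_insert_self, PySem.Dict.insert_insert_self, List.nil_append]
    have hA : stepA length seqs v = seqs.insert k s := by
      simp only [stepA, ← hkdef, hpad, hSc]
      rfl
    rw [hA, hB]
    refine ⟨?_, ?_, ?_⟩
    · rw [PySem.Dict.items_insert_of_not_contains seqs s hSc,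
        PySem.Dict.items_insert_of_not_contains groups [s] hc', List.map_append, hitems]
      rfl
    · exact PySem.Dict.nodup_keys_insert groups k [s] hnd
    · intro p hp
      rw [PySem.Dict.items_insert_of_not_contains groups [s] hc'] at hp
      rcases List.mem_append.mp hp with hpo | hpe
      · exact hne _ hpo
      · rw [List.mem_singleton.mp hpe]; simp

theorem DInv_fold (length : Int) (m : List (List (String × String)))
    (seqs : PySem.Dict String String) (groups : PySem.Dict String (List String)) (h : DInv seqs groups) :
    DInv (m.foldl (stepA length) seqs) (m.foldl (stepB length) groups) := by
  induction m generalizing seqs groups with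
  | nil => exact h
  | cons v t ih => exact ih _ _ (DInv_step length seqs groups v h)

-- ===== VERDICT (by name: the statement is the Claim_ definition above) =====
theorem get_irl_irr_spec : Claim_equal_get_irl_irr := by
  intro m length _ _
  unfold Spec_get_irl_irr get_irl_irr get_irl_irr_alt
  have h := DInv_fold length m PySem.Dict.empty PySem.Dict.empty ⟨rfl, List.nodup_nil, by simp [PySem.Dict.empty]⟩
  rw [h.1]
  rfl
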